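-- pv_equiv track=rewrite | github.com/Nidoprince/adventOfCode2018 | problem2a.py | countainsTwosOrThrees
-- ===== SOURCE A (Python) =====
-- def countainsTwosOrThrees(text):
--     letterCounter = {}
--     letterList = list(text)
--     for letter in letterList:
--         if letter in letterCounter:
--             letterCounter[letter] += 1
--         else:
--             letterCounter[letter] = 1
--     out = 0
--     if 2 in letterCounter.values():
--         out += 1
--     if 3 in letterCounter.values():
--         out += 2
--     return out
-- ===== SOURCE B (Python) =====
-- def countainsTwosOrThrees(text):
--     two = False
--     three = False
--     prev = None
--     run = 0
--     for ch in sorted(text):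
--         if ch == prev:
--             run += 1
--         else:
--             two = two or run == 2
--             three = three or run == 3
--             prev = ch
--             run = 1
--     two = two or run == 2
--     three = three or run == 3
--     return (1 if two else 0) + (2 if three else 0)
-- ===== Notes on version B (the rewrite author's own statement) =====
-- stated objective: alternative
-- what changed: Replaces the hash-map frequency table and values() membership tests with sort-then-scan: B sorts the characters and makes one pass over the sorted list tracking run lengths of equal consecutive letters, flagging a completed run of length 2 or 3 (final run flushed after the loop).
import Mathlib
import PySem

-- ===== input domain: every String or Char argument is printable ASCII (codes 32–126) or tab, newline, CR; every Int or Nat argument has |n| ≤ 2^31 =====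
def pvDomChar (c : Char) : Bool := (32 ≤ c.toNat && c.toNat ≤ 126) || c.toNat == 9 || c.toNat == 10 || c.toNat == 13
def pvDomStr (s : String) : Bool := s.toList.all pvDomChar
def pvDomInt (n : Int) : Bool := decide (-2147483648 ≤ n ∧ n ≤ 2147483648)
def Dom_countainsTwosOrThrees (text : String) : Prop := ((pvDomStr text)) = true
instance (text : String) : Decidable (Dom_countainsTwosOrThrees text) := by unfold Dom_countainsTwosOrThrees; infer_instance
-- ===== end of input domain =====

-- B replaces A's hash-map frequency table by sorting the characters and scanning runs of equal
-- consecutive letters, flagging run lengths 2 and 3 (alternative decomposition; return value only).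

-- ===== PORT A =====
def countainsTwosOrThrees (text : String) : Int :=
  let letterList := text.toList
  let letterCounter : PySem.Dict Char Int :=
    letterList.foldl (fun d letter =>
      if d.contains letter then d.insert letter (d.getD letter 0 + 1)
      else d.insert letter 1) PySem.Dict.empty
  let out : Int := 0
  let out := if (2 : Int) ∈ letterCounter.values then out + 1 else out
  let out := if (3 : Int) ∈ letterCounter.values then out + 2 else out
  out

-- ===== PORT B =====
-- the loop body of Source B: state (two, three, prev, run)
def pvStepB (st : Bool × Bool × Option Char × Nat) (ch : Char) : Bool × Bool × Option Char × Nat :=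
  if some ch == st.2.2.1 then (st.1, st.2.1, st.2.2.1, st.2.2.2 + 1)
  else (st.1 || decide (st.2.2.2 = 2), st.2.1 || decide (st.2.2.2 = 3), some ch, 1)

def countainsTwosOrThrees_alt (text : String) : Int :=
  let st := (PySem.List.sorted text.toList (fun c => c) false).foldl pvStepB (false, false, none, 0)
  let two := st.1 || decide (st.2.2.2 = 2)
  let three := st.2.1 || decide (st.2.2.2 = 3)
  (if two then 1 else 0) + (if three then 2 else 0)

-- ===== PRECONDITION & SPEC =====
def Spec_countainsTwosOrThrees (text : String) (out : Int) : Prop := out = countainsTwosOrThrees_alt text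
instance (text : String) (out : Int) : Decidable (Spec_countainsTwosOrThrees text out) := by unfold Spec_countainsTwosOrThrees; infer_instance

-- ===== CLAIM =====
def Claim_equal_countainsTwosOrThrees : Prop := ∀ (text : String), Dom_countainsTwosOrThrees text → Spec_countainsTwosOrThrees text (countainsTwosOrThrees text)

-- ===== LEMMAS AND PROOFS =====

-- A's counting loop builds exactly collections.Counter of the list.
theorem foldA_eq_counter (l : List Char) :
    l.foldl (fun d letter =>
      if d.contains letter then d.insert letter (d.getD letter 0 + 1)
      else d.insert letter 1) PySem.Dict.empty = PySem.Dict.counter l := by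
  rw [← PySem.Dict.foldl_insert_getD_add_one_eq_counter]
  suffices h : ∀ (d : PySem.Dict Char Int),
      l.foldl (fun d letter =>
        if d.contains letter then d.insert letter (d.getD letter 0 + 1)
        else d.insert letter 1) d
      = l.foldl (fun d x => d.insert x (d.getD x 0 + 1)) d from h _
  induction l with
  | nil => intro d; rfl
  | cons x xs ih =>
    intro d
    simp only [List.foldl_cons]
    by_cases hc : d.contains x
    · rw [if_pos hc]; exact ih _
    · rw [if_neg hc,
        PySem.Dict.getD_of_not_contains _ _ (by simpa using hc)]
      exact ih _

-- membership in the counter's values ↔ some letter has that count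
theorem mem_values_counter (l : List Char) (n : Int) :
    n ∈ (PySem.Dict.counter l).values ↔ ∃ c ∈ l, (l.count c : Int) = n := by
  have hv : (PySem.Dict.counter l).values = (PySem.Dict.counter l).items.map (·.2) := rfl
  rw [hv, PySem.Dict.items_counter]
  simp [List.mem_map, PySem.Set.mem_ofList, eq_comm]

-- count of a letter over a cons cell, when the letter equals / differs from the head
theorem ext_cons_self (c : Char) (rest : List Char) (run n : Nat) :
    (run + 1 + rest.count c = n ∨ ∃ x ∈ rest, x ≠ c ∧ rest.count x = n)
    ↔ (run + (c :: rest).count c = n ∨ ∃ x ∈ c :: rest, x ≠ c ∧ (c :: rest).count x = n) := by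
  have hc : (c :: rest).count c = rest.count c + 1 := by simp
  constructor
  · rintro (h | ⟨x, hx, hxc, hcnt⟩)
    · left; omega
    · exact Or.inr ⟨x, List.mem_cons_of_mem _ hx, hxc,
        by simpa [List.count_cons, Ne.symm hxc] using hcnt⟩
  · rintro (h | ⟨x, hx, hxc, hcnt⟩)
    · left; omega
    · rcases List.mem_cons.mp hx with rfl | hx'
      · exact absurd rfl hxc
      · exact Or.inr ⟨x, hx', hxc, by simpa [List.count_cons, Ne.symm hxc] using hcnt⟩

theorem ext_cons_new (cur c : Char) (rest : List Char) (run n : Nat) (two : Bool)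
    (hne : c ≠ cur) (hnm : cur ∉ c :: rest) :
    ((two || decide (run = n)) = true ∨ 1 + rest.count c = n ∨ ∃ x ∈ rest, x ≠ c ∧ rest.count x = n)
    ↔ (two = true ∨ run + (c :: rest).count cur = n ∨ ∃ x ∈ c :: rest, x ≠ cur ∧ (c :: rest).count x = n) := by
  have h0 : (c :: rest).count cur = 0 := List.count_eq_zero.mpr hnm
  have hcc : (c :: rest).count c = rest.count c + 1 := by simp
  have hxn : ∀ x ∈ rest, x ≠ cur := fun x hx h => hnm (h ▸ List.mem_cons_of_mem _ hx)
  constructor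
  · rintro (h | h | ⟨x, hx, hxc, hcnt⟩)
    · rcases Bool.or_eq_true_iff.mp h with h' | h'
      · exact Or.inl h'
      · refine Or.inr (Or.inl ?_); rw [h0]; simpa using h'
    · exact Or.inr (Or.inr ⟨c, List.mem_cons_self, hne, by omega⟩)
    · exact Or.inr (Or.inr ⟨x, List.mem_cons_of_mem _ hx, hxn x hx,
        by simpa [List.count_cons, Ne.symm hxc] using hcnt⟩)
  · rintro (h | h | ⟨x, hx, hxc, hcnt⟩)
    · exact Or.inl (by simp [h])
    · rw [h0] at h
      exact Or.inl (by simp; omega)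
    · by_cases hxeqc : x = c
      · subst hxeqc
        exact Or.inr (Or.inl (by omega))
      · rcases List.mem_cons.mp hx with rfl | hx'
        · exact absurd rfl hxeqc
        · exact Or.inr (Or.inr ⟨x, hx', hxeqc,
            by simpa [List.count_cons, Ne.symm hxeqc] using hcnt⟩)

-- the run-length scan over a sorted tail: flushed flags ↔ some letter has count 2 (resp. 3)
theorem scan_spec (s : List Char) (cur : Char) (run : Nat) (two three : Bool)
    (hs : s.Pairwise (· ≤ ·)) (hcur : ∀ x ∈ s, cur ≤ x) :
    (((s.foldl pvStepB (two, three, some cur, run)).1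
        || decide ((s.foldl pvStepB (two, three, some cur, run)).2.2.2 = 2)) = true
      ↔ two = true ∨ run + s.count cur = 2 ∨ ∃ c ∈ s, c ≠ cur ∧ s.count c = 2)
    ∧ (((s.foldl pvStepB (two, three, some cur, run)).2.1
        || decide ((s.foldl pvStepB (two, three, some cur, run)).2.2.2 = 3)) = true
      ↔ three = true ∨ run + s.count cur = 3 ∨ ∃ c ∈ s, c ≠ cur ∧ s.count c = 3) := by
  induction s generalizing cur run two three with
  | nil => simp
  | cons c rest ih =>
    rcases List.pairwise_cons.mp hs with ⟨hc, hrest⟩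
    by_cases hceq : c = cur
    · subst hceq
      have step : pvStepB (two, three, some c, run) c = (two, three, some c, run + 1) := by
        simp [pvStepB]
      have ihh := ih c (run + 1) two three hrest hc
      constructor
      · rw [List.foldl_cons, step, ihh.1]
        exact or_congr_right (ext_cons_self c rest run 2)
      · rw [List.foldl_cons, step, ihh.2]
        exact or_congr_right (ext_cons_self c rest run 3)
    · have hlt : cur < c := lt_of_le_of_ne (hcur c List.mem_cons_self) (fun h => hceq h.symm)
      have hnotmem : cur ∉ (c :: rest) := by
        intro hm
        rcases List.mem_cons.mp hm with rfl | hm'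
        · exact hceq rfl
        · exact absurd (hc cur hm') (not_le_of_gt hlt)
      have step : pvStepB (two, three, some cur, run) c
          = (two || decide (run = 2), three || decide (run = 3), some c, 1) := by
        simp [pvStepB, hceq]
      have ihh := ih c 1 (two || decide (run = 2)) (three || decide (run = 3)) hrest hc
      constructor
      · rw [List.foldl_cons, step, ihh.1]
        exact ext_cons_new cur c rest run 2 two hceq hnotmem
      · rw [List.foldl_cons, step, ihh.2]
        exact ext_cons_new cur c rest run 3 three hceq hnotmem

-- ===== VERDICT =====
theorem countainsTwosOrThrees_spec : Claim_equal_countainsTwosOrThrees := by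
  intro text _
  unfold Spec_countainsTwosOrThrees countainsTwosOrThrees countainsTwosOrThrees_alt
  simp only [foldA_eq_counter]
  set l := text.toList with hl
  set s := PySem.List.sorted l (fun c => c) false with hsdef
  have hperm : s.Perm l := PySem.List.sorted_perm l (fun c => c) false
  have hsorted : s.Pairwise (· ≤ ·) := by
    have := PySem.List.sorted_pairwise l (fun c => c)
    simpa using this
  have hA : ∀ n : Nat, ((n : Int) ∈ (PySem.Dict.counter l).values ↔ ∃ c ∈ s, s.count c = n) := by
    intro n
    rw [mem_values_counter]
    constructor
    · rintro ⟨c, hc, hcnt⟩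
      exact ⟨c, hperm.mem_iff.mpr hc, by rw [hperm.count_eq]; exact_mod_cast hcnt⟩
    · rintro ⟨c, hc, hcnt⟩
      exact ⟨c, hperm.mem_iff.mp hc, by rw [← hperm.count_eq]; exact_mod_cast hcnt⟩
  have hA2 := hA 2
  have hA3 := hA 3
  norm_num at hA2 hA3
  cases hse : s with
  | nil =>
    have h2 : ¬ ((2 : Int) ∈ (PySem.Dict.counter l).values) := by
      rw [hA2]; simp [hse]
    have h3 : ¬ ((3 : Int) ∈ (PySem.Dict.counter l).values) := by
      rw [hA3]; simp [hse]
    simp [h2, h3, List.foldl]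
  | cons c0 rest =>
    have hrest : rest.Pairwise (· ≤ ·) := (List.pairwise_cons.mp (hse ▸ hsorted)).2
    have hc0 : ∀ x ∈ rest, c0 ≤ x := (List.pairwise_cons.mp (hse ▸ hsorted)).1
    have step0 : pvStepB (false, false, none, 0) c0 = (false, false, some c0, 1) := by
      simp [pvStepB]
    have hscan := scan_spec rest c0 1 false false hrest hc0
    have hiff : ∀ n : Nat,
        ((1 + rest.count c0 = n ∨ ∃ c ∈ rest, c ≠ c0 ∧ rest.count c = n)
          ↔ ∃ c ∈ s, s.count c = n) := by
      intro n
      rw [hse]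
      have hcc : (c0 :: rest).count c0 = rest.count c0 + 1 := by simp
      constructor
      · rintro (h | ⟨c, hc, hcc0, hcnt⟩)
        · exact ⟨c0, List.mem_cons_self, by omega⟩
        · exact ⟨c, List.mem_cons_of_mem _ hc, by simpa [List.count_cons, Ne.symm hcc0] using hcnt⟩
      · rintro ⟨c, hc, hcnt⟩
        by_cases hcc0 : c = c0
        · subst hcc0; left; omega
        · rcases List.mem_cons.mp hc with rfl | hc'
          · exact absurd rfl hcc0
          · exact Or.inr ⟨c, hc', hcc0, by simpa [List.count_cons, Ne.symm hcc0] using hcnt⟩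
    have h2 : ((rest.foldl pvStepB (false, false, some c0, 1)).1
        || decide ((rest.foldl pvStepB (false, false, some c0, 1)).2.2.2 = 2)) = true
        ↔ (2 : Int) ∈ (PySem.Dict.counter l).values := by
      rw [hscan.1, hA2, ← hiff 2]; simp
    have h3 : ((rest.foldl pvStepB (false, false, some c0, 1)).2.1
        || decide ((rest.foldl pvStepB (false, false, some c0, 1)).2.2.2 = 3)) = true
        ↔ (3 : Int) ∈ (PySem.Dict.counter l).values := by
      rw [hscan.2, hA3, ← hiff 3]; simp
    simp only [List.foldl_cons, step0]
    by_cases p2 : (2 : Int) ∈ (PySem.Dict.counter l).values <;>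
    by_cases p3 : (3 : Int) ∈ (PySem.Dict.counter l).values <;>
    simp [p2, p3, h2, h3]
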